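-- pv_equiv track=rewrite | github.com/Rampagy/AdventOfCode2022 | Day14/helpers.py | BFS_parent
-- ===== SOURCE A (Python) =====
-- import queue
--
-- def BFS_parent(graph, start, end):
--     '''
--     We use this function to find the parent of all nodes in the graph.
--     So in this function, we will use queue to make a traversal of the graph and update the dictionary "parent" like this: parent.update({2:[1]}).
--     If a node has multiple parents, the key of that node in the dictionary should look like this: 5: [3, 4]
--     '''
--     q=queue.Queue()
--     q.put([start])
--     parent={}
--     # your code starts here
--
--     while not q.empty():
--         vs = q.get()
--         for v in vs:
--             if v == end:
--                 pass
--             if v in graph: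
--                 for search_v in graph[v]:
--                     if search_v in parent:
--                         if v not in parent[search_v]:
--                             parent[search_v] = parent[search_v] + [v]
--                     else:
--                         parent[search_v] = [v]
--                     q.put([search_v])
--
--     # your code ends here
--     return parent
-- ===== SOURCE B (Python) =====
-- def BFS_parent(graph, start, end):
--     # pass 1: plain BFS computing the discovery order (each node enqueued once)
--     order = [start]
--     seen = {start}
--     for v in order:
--         for s in graph.get(v, []):
--             if s not in seen:
--                 seen.add(s)
--                 order.append(s)
--     # pass 2: build the parent lists by scanning the edges in discovery order
--     parent = {}
--     for v in order:
--         for s in graph.get(v, []):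
--             lst = parent.get(s, [])
--             if v not in lst:
--                 parent[s] = lst + [v]
--     return parent
-- ===== Notes on version B (the rewrite author's own statement) =====
-- stated objective: alternative
-- what changed: A re-enqueues every neighbour unconditionally, reprocessing a node once per queue entry that reaches it (and never terminating on a reachable cycle); B works in two staged passes: a plain BFS with a seen set that computes the discovery order (each node enqueued once), then a single scan of the edges in that order building the parent lists.
import Mathlib
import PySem

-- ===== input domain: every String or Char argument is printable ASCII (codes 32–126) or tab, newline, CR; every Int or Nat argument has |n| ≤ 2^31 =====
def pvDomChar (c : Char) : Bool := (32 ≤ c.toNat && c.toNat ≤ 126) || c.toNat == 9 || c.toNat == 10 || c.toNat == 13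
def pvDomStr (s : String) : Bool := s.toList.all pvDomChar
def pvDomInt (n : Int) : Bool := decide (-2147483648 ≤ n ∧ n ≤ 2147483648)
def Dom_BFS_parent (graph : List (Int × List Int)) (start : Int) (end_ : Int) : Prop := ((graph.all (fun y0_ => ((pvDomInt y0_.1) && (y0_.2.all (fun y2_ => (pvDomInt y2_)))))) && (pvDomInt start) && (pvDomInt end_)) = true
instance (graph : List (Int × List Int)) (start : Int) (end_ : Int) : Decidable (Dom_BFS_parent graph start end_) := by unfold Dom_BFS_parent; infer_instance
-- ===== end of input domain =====

-- B replaces A's repeated-requeue traversal by two staged passes: a plain BFS with a seen set that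
-- computes the discovery order, then one scan of the edges in that order building the parent lists;
-- return values agree on every input where A terminates (Pre_: the part of the graph reachable from
-- start is acyclic — on a reachable cycle the Python A loops forever).

-- ===== PORT A =====
-- A's parent-dict update for one edge v -> s:
-- `if search_v in parent: if v not in parent[search_v]: parent[search_v] = parent[search_v] + [v] else: parent[search_v] = [v]`
def updP (parent : PySem.Dict Int (List Int)) (v s : Int) : PySem.Dict Int (List Int) :=
  match PySem.Dict.get? parent s with
  | some ps => if v ∈ ps then parent else PySem.Dict.insert parent s (ps ++ [v])
  | none => PySem.Dict.insert parent s [v]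

-- body of A's `for v in vs` loop: `if v in graph: for search_v in graph[v]: … q.put([search_v])`
def stepA (graph : List (Int × List Int)) (st : List (List Int) × PySem.Dict Int (List Int)) (v : Int) :
    List (List Int) × PySem.Dict Int (List Int) :=
  match PySem.Dict.get? (PySem.Dict.mk graph) v with
  | some adj => adj.foldl (fun st s => (st.1 ++ [[s]], updP st.2 v s)) st
  | none => st

-- total number of adjacency entries (used only to size the fuel / iteration bounds)
def allVals (graph : List (Int × List Int)) : List Int := graph.flatMap (fun p => p.2)
def nb (graph : List (Int × List Int)) : Nat := (allVals graph).length + 2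
-- fuel: an upper bound (proved below, under Pre_) on the number of while-iterations of A's queue loop;
-- the recursion stops as soon as the queue is empty, so the padding is inert.
def fuelA (graph : List (Int × List Int)) : Nat := (nb graph) ^ (nb graph)

-- A's `while not q.empty(): vs = q.get(); for v in vs: …`
def runA (graph : List (Int × List Int)) :
    Nat → List (List Int) → PySem.Dict Int (List Int) → PySem.Dict Int (List Int)
  | _, [], parent => parent
  | 0, _ :: _, parent => parent
  | fuel + 1, vs :: q, parent =>
      let st := vs.foldl (fun st v => stepA graph st v) (q, parent)
      runA graph fuel st.1 st.2

def BFS_parent (graph : List (Int × List Int)) (start : Int) (end_ : Int) : List (Int × List Int) :=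
  (runA graph (fuelA graph) [[start]] PySem.Dict.empty).items

-- ===== PORT B =====
-- B's `graph.get(v, [])`
def adjL (graph : List (Int × List Int)) (v : Int) : List Int :=
  (PySem.Dict.get? (PySem.Dict.mk graph) v).getD []

-- B's pass-2 update: `lst = parent.get(s, []); if v not in lst: parent[s] = lst + [v]`
def updB (parent : PySem.Dict Int (List Int)) (v s : Int) : PySem.Dict Int (List Int) :=
  let lst := (PySem.Dict.get? parent s).getD []
  if v ∈ lst then parent else PySem.Dict.insert parent s (lst ++ [v])

-- B's pass-1 loop `for v in order: for s in graph.get(v, []): if s not in seen: …`.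
-- Python only ever reads the not-yet-visited suffix of `order`, so carrying that suffix as the first
-- argument is exact; fuel is only a totality guard (each node is enqueued at most once).
def bfsOrder (graph : List (Int × List Int)) :
    Nat → List Int → PySem.Set Int → List Int
  | _, [], _ => []
  | 0, _ :: _, _ => []
  | fuel + 1, v :: q, seen =>
      let st := (adjL graph v).foldl
        (fun st s => if s ∈ st.2 then st else (st.1 ++ [s], PySem.Set.add st.2 s)) (q, seen)
      v :: bfsOrder graph fuel st.1 st.2

-- pass 2: `for v in order: for s in graph.get(v, []): …`
def BFS_parent_alt (graph : List (Int × List Int)) (start : Int) (end_ : Int) : List (Int × List Int) :=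
  ((bfsOrder graph (fuelA graph) [start] (PySem.Set.ofList [start])).foldl
    (fun P v => (adjL graph v).foldl (fun P s => updB P v s) P) PySem.Dict.empty).items

-- ===== PRECONDITION & SPEC =====
-- reachability closure of the input graph (a property of the INPUT, not of either algorithm):
-- iterate "add all successors" enough times that the set saturates.
def stepR (graph : List (Int × List Int)) (X : List Int) : List Int :=
  X.foldl (fun acc v => PySem.Set.update acc (adjL graph v)) X
def iterR (graph : List (Int × List Int)) : Nat → List Int → List Int
  | 0, X => X
  | n + 1, X => iterR graph n (stepR graph X)
def reachN (graph : List (Int × List Int)) (v : Int) : List Int := iterR graph (nb graph) [v]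

-- Pre_ excludes exactly the inputs where the Python A loops forever (never returns): a cycle among the
-- nodes reachable from start. It does not exclude any input on which A returns.
def Pre_BFS_parent (graph : List (Int × List Int)) (start : Int) (end_ : Int) : Prop :=
  ∀ v ∈ reachN graph start, ∀ s ∈ adjL graph v, v ∉ reachN graph s
instance (graph : List (Int × List Int)) (start : Int) (end_ : Int) : Decidable (Pre_BFS_parent graph start end_) := by
  unfold Pre_BFS_parent; infer_instance

def pvWitness_BFS_parent : (List (Int × List Int)) × Int × Int := ([(0, [1, 2]), (1, [2]), (2, [3])], 0, 3)

def Spec_BFS_parent (graph : List (Int × List Int)) (start : Int) (end_ : Int) (out : List (Int × List Int)) : Prop := out = BFS_parent_alt graph start end_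
instance (graph : List (Int × List Int)) (start : Int) (end_ : Int) (out : List (Int × List Int)) : Decidable (Spec_BFS_parent graph start end_ out) := by unfold Spec_BFS_parent; infer_instance

-- ===== CLAIM (what is proved, stated in full; the proofs are below) =====
def Claim_equal_BFS_parent : Prop := ∀ (graph : List (Int × List Int)) (start : Int) (end_ : Int), Dom_BFS_parent graph start end_ → Pre_BFS_parent graph start end_ → Spec_BFS_parent graph start end_ (BFS_parent graph start end_)

-- ===== LEMMAS AND PROOFS =====

theorem pvWitness_ok :
    Dom_BFS_parent pvWitness_BFS_parent.1 pvWitness_BFS_parent.2.1 pvWitness_BFS_parent.2.2 ∧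
    Pre_BFS_parent pvWitness_BFS_parent.1 pvWitness_BFS_parent.2.1 pvWitness_BFS_parent.2.2 := by
  constructor <;> decide

-- ---- proof device: B's two passes fused into one combined loop (queue, seen, parent) ----
def stepC (graph : List (Int × List Int)) (v : Int)
    (st : List Int × PySem.Set Int × PySem.Dict Int (List Int)) :
    List Int × PySem.Set Int × PySem.Dict Int (List Int) :=
  (adjL graph v).foldl
    (fun st s =>
      let parent := updP st.2.2 v s
      if s ∈ st.2.1 then (st.1, st.2.1, parent)
      else (st.1 ++ [s], PySem.Set.add st.2.1 s, parent)) st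

def runC (graph : List (Int × List Int)) :
    Nat → List Int → PySem.Set Int → PySem.Dict Int (List Int) → PySem.Dict Int (List Int)
  | _, [], _, parent => parent
  | 0, _ :: _, _, parent => parent
  | fuel + 1, v :: q, seen, parent =>
      let st := stepC graph v (q, seen, parent)
      runC graph fuel st.1 st.2.1 st.2.2

-- ---- B's update function agrees with A's ----
theorem updB_eq_updP (P : PySem.Dict Int (List Int)) (v s : Int) : updB P v s = updP P v s := by
  unfold updB updP
  cases h : PySem.Dict.get? P s <;> simp

-- ---- the combined fold splits into the seen/queue fold and the parent fold ----
theorem stepC_split (graph : List (Int × List Int)) (v : Int) :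
    ∀ (adj q : List Int) (S : PySem.Set Int) (P : PySem.Dict Int (List Int)),
      adj.foldl
        (fun st s =>
          let parent := updP st.2.2 v s
          if s ∈ st.2.1 then (st.1, st.2.1, parent)
          else (st.1 ++ [s], PySem.Set.add st.2.1 s, parent)) (q, S, P) =
      ((adj.foldl (fun st s => if s ∈ st.2 then st else (st.1 ++ [s], PySem.Set.add st.2 s)) (q, S)).1,
       (adj.foldl (fun st s => if s ∈ st.2 then st else (st.1 ++ [s], PySem.Set.add st.2 s)) (q, S)).2,
       adj.foldl (fun P s => updP P v s) P) := by
  intro adj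
  induction adj with
  | nil => intro q S P; rfl
  | cons s t ih =>
    intro q S P
    simp only [List.foldl_cons]
    by_cases hs : s ∈ S
    · simp only [if_pos hs]
      exact ih q S (updP P v s)
    · simp only [if_neg hs]
      exact ih (q ++ [s]) (PySem.Set.add S s) (updP P v s)

theorem runC_split (graph : List (Int × List Int)) :
    ∀ (f : Nat) (q : List Int) (S : PySem.Set Int) (P : PySem.Dict Int (List Int)),
      runC graph f q S P =
        (bfsOrder graph f q S).foldl
          (fun P v => (adjL graph v).foldl (fun P s => updP P v s) P) P := by
  intro f
  induction f with
  | zero => intro q S P; cases q <;> rfl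
  | succ f ih =>
    intro q S P
    cases q with
    | nil => rfl
    | cons v t =>
      simp only [runC, bfsOrder, List.foldl_cons]
      unfold stepC
      rw [stepC_split graph v]
      exact ih _ _ _

-- ---- the flat view of A's loop, with explicit failure on fuel exhaustion ----
def runFlatO (graph : List (Int × List Int)) :
    Nat → List Int → PySem.Dict Int (List Int) → Option (PySem.Dict Int (List Int))
  | _, [], parent => some parent
  | 0, _ :: _, _ => none
  | fuel + 1, v :: q, parent =>
      runFlatO graph fuel (q ++ adjL graph v)
        ((adjL graph v).foldl (fun P s => updP P v s) parent)

-- ---- basic facts about adjacency lists ----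
theorem nodup_len_le (l m : List Int) (h : l.Nodup) (hs : ∀ x ∈ l, x ∈ m) : l.length ≤ m.length := by
  calc l.length = l.toFinset.card := (List.toFinset_card_of_nodup h).symm
  _ ≤ m.toFinset.card := Finset.card_le_card (by intro x hx; simp at hx ⊢; exact hs x hx)
  _ ≤ m.length := m.toFinset_card_le

theorem nodup_len_lt (l m : List Int) (h1 : l.Nodup) (hs : ∀ x ∈ l, x ∈ m) (a : Int)
    (ham : a ∈ m) (hal : a ∉ l) : l.length < m.length := by
  have h2 : l.toFinset.card < m.toFinset.card := by
    apply Finset.card_lt_card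
    constructor
    · intro x hx; simp at hx ⊢; exact hs x hx
    · intro hc
      have := hc (by simp [ham] : a ∈ m.toFinset)
      simp at this
      exact hal this
  calc l.length = l.toFinset.card := (List.toFinset_card_of_nodup h1).symm
  _ < m.toFinset.card := h2
  _ ≤ m.length := m.toFinset_card_le

theorem get?_mk_mem (graph : List (Int × List Int)) (v : Int) (l : List Int)
    (h : PySem.Dict.get? (PySem.Dict.mk graph) v = some l) : ∃ p ∈ graph, p.2 = l := by
  induction graph with
  | nil => simp [PySem.Dict.get?] at h
  | cons p rest ih =>
    rw [PySem.Dict.get?_mk_cons] at h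
    by_cases hv : p.1 == v
    · simp [hv] at h; exact ⟨p, by simp, h⟩
    · simp [hv] at h; obtain ⟨q, hq, hql⟩ := ih h; exact ⟨q, by simp [hq], hql⟩

theorem adjL_sub_vals (graph : List (Int × List Int)) (v s : Int) (h : s ∈ adjL graph v) :
    s ∈ allVals graph := by
  unfold adjL at h
  cases hg : PySem.Dict.get? (PySem.Dict.mk graph) v with
  | none => rw [hg] at h; simp at h
  | some l =>
    rw [hg] at h; simp at h
    obtain ⟨p, hp, hpl⟩ := get?_mk_mem graph v l hg
    exact List.mem_flatMap.mpr ⟨p, hp, by rw [hpl]; exact h⟩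

theorem len_le_flat (graph : List (Int × List Int)) (p : Int × List Int) (hp : p ∈ graph) :
    p.2.length ≤ (allVals graph).length := by
  unfold allVals
  induction graph with
  | nil => simp at hp
  | cons q rest ih =>
    simp only [List.flatMap_cons, List.length_append]
    rcases List.mem_cons.mp hp with h | h
    · subst h; omega
    · have := ih h; omega

theorem adjL_len_le (graph : List (Int × List Int)) (v : Int) :
    (adjL graph v).length ≤ (allVals graph).length := by
  unfold adjL
  cases hg : PySem.Dict.get? (PySem.Dict.mk graph) v with
  | none => simp
  | some l =>
    simp only [Option.getD_some]
    obtain ⟨p, hp, hpl⟩ := get?_mk_mem graph v l hg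
    subst hpl
    exact len_le_flat graph p hp

-- ---- reachability lemmas ----
theorem upd_prefix : ∀ (xs acc : List Int), ∃ t, PySem.Set.update acc xs = acc ++ t := by
  intro xs
  induction xs with
  | nil => intro acc; exact ⟨[], by simp [PySem.Set.update_nil]⟩
  | cons x t ih =>
    intro acc
    rw [PySem.Set.update_cons]
    by_cases hx : x ∈ acc
    · rw [PySem.Set.add_of_mem hx]; exact ih acc
    · rw [PySem.Set.add_of_not_mem hx]
      obtain ⟨u, hu⟩ := ih (acc ++ [x])
      exact ⟨x :: u, by rw [hu]; simp⟩

theorem mem_foldl_upd (graph : List (Int × List Int)) :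
    ∀ (l acc : List Int) (x : Int),
      x ∈ l.foldl (fun acc v => PySem.Set.update acc (adjL graph v)) acc ↔
        x ∈ acc ∨ ∃ v ∈ l, x ∈ adjL graph v := by
  intro l
  induction l with
  | nil => simp
  | cons v t ih =>
    intro acc x
    simp only [List.foldl_cons]
    rw [ih, PySem.Set.mem_update]
    simp only [List.mem_cons, exists_eq_or_imp]
    tauto

theorem foldl_upd_prefix (graph : List (Int × List Int)) :
    ∀ (l acc : List Int), ∃ t, l.foldl (fun acc v => PySem.Set.update acc (adjL graph v)) acc = acc ++ t := by
  intro l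
  induction l with
  | nil => intro acc; exact ⟨[], by simp⟩
  | cons v t ih =>
    intro acc
    simp only [List.foldl_cons]
    obtain ⟨u1, hu1⟩ := upd_prefix (adjL graph v) acc
    obtain ⟨u2, hu2⟩ := ih (PySem.Set.update acc (adjL graph v))
    exact ⟨u1 ++ u2, by rw [hu2, hu1, List.append_assoc]⟩

theorem nodup_foldl_upd (graph : List (Int × List Int)) :
    ∀ (l acc : List Int), acc.Nodup →
      (l.foldl (fun acc v => PySem.Set.update acc (adjL graph v)) acc).Nodup := by
  intro l
  induction l with
  | nil => intro acc h; simpa using h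
  | cons v t ih =>
    intro acc h
    simp only [List.foldl_cons]
    exact ih _ (PySem.Set.nodup_update _ _ h)

theorem mem_stepR (graph : List (Int × List Int)) (X : List Int) (x : Int) :
    x ∈ stepR graph X ↔ x ∈ X ∨ ∃ v ∈ X, x ∈ adjL graph v :=
  mem_foldl_upd graph X X x

theorem stepR_prefix (graph : List (Int × List Int)) (X : List Int) : ∃ t, stepR graph X = X ++ t :=
  foldl_upd_prefix graph X X

theorem nodup_stepR (graph : List (Int × List Int)) (X : List Int) (h : X.Nodup) : (stepR graph X).Nodup :=
  nodup_foldl_upd graph X X h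

theorem iterR_fix (graph : List (Int × List Int)) (X : List Int) (h : stepR graph X = X) :
    ∀ n, iterR graph n X = X := by
  intro n
  induction n with
  | zero => rfl
  | succ n ih => show iterR graph n (stepR graph X) = X; rw [h]; exact ih

theorem iterR_add (graph : List (Int × List Int)) :
    ∀ (m n : Nat) (X : List Int), iterR graph (m + n) X = iterR graph n (iterR graph m X) := by
  intro m
  induction m with
  | zero => intro n X; simp [iterR]
  | succ m ih =>
    intro n X
    have h1 : m + 1 + n = (m + n) + 1 := by omega
    rw [h1]
    show iterR graph (m + n) (stepR graph X) = iterR graph n (iterR graph m (stepR graph X))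
    exact ih n (stepR graph X)

theorem mem_iterR_init (graph : List (Int × List Int)) :
    ∀ (n : Nat) (X : List Int) (x : Int), x ∈ X → x ∈ iterR graph n X := by
  intro n
  induction n with
  | zero => intro X x h; exact h
  | succ n ih =>
    intro X x h
    show x ∈ iterR graph n (stepR graph X)
    exact ih _ _ ((mem_stepR graph X x).mpr (Or.inl h))

theorem nodup_iterR (graph : List (Int × List Int)) :
    ∀ (n : Nat) (X : List Int), X.Nodup → (iterR graph n X).Nodup := by
  intro n
  induction n with
  | zero => intro X h; exact h
  | succ n ih => intro X h; exact ih _ (nodup_stepR graph X h)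

theorem iterR_sub_vals (graph : List (Int × List Int)) :
    ∀ (n : Nat) (X : List Int) (x : Int), x ∈ iterR graph n X → x ∈ X ∨ x ∈ allVals graph := by
  intro n
  induction n with
  | zero => intro X x h; exact Or.inl h
  | succ n ih =>
    intro X x h
    rcases ih (stepR graph X) x h with h2 | h2
    · rcases (mem_stepR graph X x).mp h2 with h3 | ⟨w, _, h3⟩
      · exact Or.inl h3
      · exact Or.inr (adjL_sub_vals graph w x h3)
    · exact Or.inr h2

theorem iterR_grow (graph : List (Int × List Int)) (X : List Int) :
    ∀ k, (∃ j ≤ k, stepR graph (iterR graph j X) = iterR graph j X) ∨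
      k + X.length ≤ (iterR graph k X).length := by
  intro k
  induction k with
  | zero => right; simp [iterR]
  | succ k ih =>
    rcases ih with ⟨j, hj, hfix⟩ | hlen
    · exact Or.inl ⟨j, by omega, hfix⟩
    · by_cases hfix : stepR graph (iterR graph k X) = iterR graph k X
      · exact Or.inl ⟨k, by omega, hfix⟩
      · right
        have h1 : iterR graph (k + 1) X = stepR graph (iterR graph k X) := by
          rw [iterR_add graph k 1 X]; rfl
        obtain ⟨t, ht⟩ := stepR_prefix graph (iterR graph k X)
        have hne : t ≠ [] := by
          intro h0; rw [h0, List.append_nil] at ht; exact hfix ht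
        have : 1 ≤ t.length := List.length_pos_iff.mpr hne
        rw [h1, ht]
        simp only [List.length_append]
        omega

theorem reach_fix (graph : List (Int × List Int)) (v : Int) :
    stepR graph (reachN graph v) = reachN graph v := by
  rcases iterR_grow graph [v] ((allVals graph).length + 1) with ⟨j, hj, hfix⟩ | hlen
  · have h1 : reachN graph v = iterR graph j [v] := by
      unfold reachN nb
      have h2 : (allVals graph).length + 2 = j + ((allVals graph).length + 2 - j) := by omega
      rw [h2, iterR_add, iterR_fix _ _ hfix]
    rw [h1, hfix]
  · exfalso
    have hn : (iterR graph ((allVals graph).length + 1) [v]).Nodup := nodup_iterR _ _ _ (by simp)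
    have hsub : ∀ x ∈ iterR graph ((allVals graph).length + 1) [v], x ∈ v :: allVals graph := by
      intro x hx
      rcases iterR_sub_vals _ _ _ _ hx with h | h
      · simp at h; simp [h]
      · simp [h]
    have hle := nodup_len_le _ _ hn hsub
    simp only [List.length_cons] at hle hlen
    omega

theorem reach_self (graph : List (Int × List Int)) (v : Int) : v ∈ reachN graph v :=
  mem_iterR_init graph _ _ _ (by simp)

theorem reach_closed (graph : List (Int × List Int)) (v u s : Int)
    (hu : u ∈ reachN graph v) (hs : s ∈ adjL graph u) : s ∈ reachN graph v := by
  have h := reach_fix graph v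
  rw [← h]
  exact (mem_stepR graph _ s).mpr (Or.inr ⟨u, hu, hs⟩)

theorem iterR_sub_closed (graph : List (Int × List Int)) (C : List Int)
    (hC : ∀ u ∈ C, ∀ s ∈ adjL graph u, s ∈ C) :
    ∀ (n : Nat) (X : List Int), (∀ x ∈ X, x ∈ C) → ∀ x ∈ iterR graph n X, x ∈ C := by
  intro n
  induction n with
  | zero => intro X hX x hx; exact hX x hx
  | succ n ih =>
    intro X hX x hx
    refine ih (stepR graph X) ?_ x hx
    intro y hy
    rcases (mem_stepR graph X y).mp hy with h | ⟨w, hw, hy2⟩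
    · exact hX y h
    · exact hC w (hX w hw) y hy2

theorem reach_trans (graph : List (Int × List Int)) (v u x : Int)
    (hu : u ∈ reachN graph v) (hx : x ∈ reachN graph u) : x ∈ reachN graph v :=
  iterR_sub_closed graph (reachN graph v) (fun a ha s hs => reach_closed graph v a s ha hs)
    (nb graph) [u] (by intro y hy; simp at hy; rw [hy]; exact hu) x hx

theorem nodup_reach (graph : List (Int × List Int)) (v : Int) : (reachN graph v).Nodup :=
  nodup_iterR graph _ _ (by simp)

theorem reachLen_le (graph : List (Int × List Int)) (v : Int) :
    (reachN graph v).length ≤ 1 + (allVals graph).length := by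
  have h := nodup_len_le (reachN graph v) (v :: allVals graph) (nodup_reach graph v) ?_
  · simp only [List.length_cons] at h; omega
  · intro x hx
    rcases iterR_sub_vals graph _ _ _ hx with h | h
    · simp at h; simp [h]
    · simp [h]

theorem reachLen_lt (graph : List (Int × List Int)) (start end_ : Int)
    (pre : Pre_BFS_parent graph start end_) (v s : Int)
    (hv : v ∈ reachN graph start) (hs : s ∈ adjL graph v) :
    (reachN graph s).length < (reachN graph v).length := by
  have hsv : s ∈ reachN graph v := reach_closed graph v v s (reach_self graph v) hs
  exact nodup_len_lt (reachN graph s) (reachN graph v) (nodup_reach graph s)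
    (fun x hx => reach_trans graph v s x hsv hx) v (reach_self graph v) (pre v hv s hs)

-- ---- runA computes runFlatO ----
theorem foldlA_char (v : Int) :
    ∀ (adj : List Int) (q : List (List Int)) (P : PySem.Dict Int (List Int)),
      adj.foldl (fun st s => (st.1 ++ [[s]], updP st.2 v s)) (q, P) =
        (q ++ adj.map (fun s => [s]), adj.foldl (fun P s => updP P v s) P) := by
  intro adj
  induction adj with
  | nil => intro q P; simp
  | cons a t ih =>
    intro q P
    simp only [List.foldl_cons, List.map_cons]
    rw [ih]
    simp [List.append_assoc]

theorem stepA_char (graph : List (Int × List Int)) (v : Int) (q : List Int) (P : PySem.Dict Int (List Int)) :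
    stepA graph (q.map (fun x => [x]), P) v =
      ((q ++ adjL graph v).map (fun x => [x]),
        (adjL graph v).foldl (fun P s => updP P v s) P) := by
  unfold stepA adjL
  cases hg : PySem.Dict.get? (PySem.Dict.mk graph) v with
  | none => simp
  | some adj => simp [foldlA_char]

theorem runA_of_runFlatO (graph : List (Int × List Int)) :
    ∀ (n : Nat) (q : List Int) (P R : PySem.Dict Int (List Int)),
      runFlatO graph n q P = some R → runA graph n (q.map (fun x => [x])) P = R := by
  intro n
  induction n with
  | zero =>
    intro q P R h
    cases q with
    | nil => simp only [runFlatO, Option.some.injEq] at h; simp [runA, h]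
    | cons v t => simp [runFlatO] at h
  | succ n ih =>
    intro q P R h
    cases q with
    | nil => simp only [runFlatO, Option.some.injEq] at h; simp [runA, h]
    | cons v t =>
      simp only [runFlatO] at h
      have := ih _ _ _ h
      simp only [List.map_cons]
      show runA graph (n + 1) ([v] :: t.map (fun x => [x])) P = R
      simp only [runA, List.foldl_cons, List.foldl_nil]
      rw [stepA_char]
      exact this

-- ---- termination of A under Pre_ ----
def pot (graph : List (Int × List Int)) (q : List Int) : Nat :=
  (q.map (fun v => (nb graph) ^ (reachN graph v).length)).sum

theorem runFlatO_term (graph : List (Int × List Int)) (start end_ : Int)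
    (pre : Pre_BFS_parent graph start end_) :
    ∀ (n : Nat) (q : List Int) (P : PySem.Dict Int (List Int)),
      (∀ v ∈ q, v ∈ reachN graph start) → pot graph q ≤ n →
      ∃ R, runFlatO graph n q P = some R := by
  have hnb : 2 ≤ nb graph := by unfold nb; omega
  intro n
  induction n with
  | zero =>
    intro q P hq hpot
    cases q with
    | nil => exact ⟨P, rfl⟩
    | cons v t =>
      exfalso
      have h1 : 1 ≤ nb graph ^ (reachN graph v).length := Nat.one_le_pow _ _ (by omega)
      unfold pot at hpot
      simp only [List.map_cons, List.sum_cons] at hpot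
      omega
  | succ n ih =>
    intro q P hq hpot
    cases q with
    | nil => exact ⟨P, rfl⟩
    | cons v t =>
      have hv : v ∈ reachN graph start := hq v (by simp)
      show ∃ R, runFlatO graph n (t ++ adjL graph v) _ = some R
      apply ih
      · intro x hx
        rcases List.mem_append.mp hx with h | h
        · exact hq x (by simp [h])
        · exact reach_closed graph start v x hv h
      · -- potential decreases by at least one
        have hrv1 : 1 ≤ (reachN graph v).length :=
          List.length_pos_of_mem (reach_self graph v)
        set x := nb graph ^ ((reachN graph v).length - 1) with hxdef
        have hx1 : 1 ≤ x := Nat.one_le_pow _ _ (by omega)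
        have hsum : ((adjL graph v).map (fun s => nb graph ^ (reachN graph s).length)).sum ≤
            (nb graph - 2) * x := by
          have hb : ∀ y ∈ (adjL graph v).map (fun s => nb graph ^ (reachN graph s).length), y ≤ x := by
            intro y hy
            obtain ⟨sv, hsv, rfl⟩ := List.mem_map.mp hy
            exact Nat.pow_le_pow_right (by omega)
              (by have := reachLen_lt graph start end_ pre v sv hv hsv; omega)
          calc ((adjL graph v).map (fun s => nb graph ^ (reachN graph s).length)).sum
              ≤ ((adjL graph v).map (fun s => nb graph ^ (reachN graph s).length)).length • x :=
                List.sum_le_card_nsmul _ _ hb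
            _ = (adjL graph v).length * x := by simp [smul_eq_mul]
            _ ≤ (nb graph - 2) * x := by
                apply Nat.mul_le_mul_right
                have := adjL_len_le graph v
                unfold nb
                omega
        have e1 : pot graph (t ++ adjL graph v) =
            pot graph t + ((adjL graph v).map (fun s => nb graph ^ (reachN graph s).length)).sum := by
          unfold pot; simp
        have e3 : pot graph (v :: t) = pot graph t + (nb graph - 2) * x + 2 * x := by
          unfold pot
          simp only [List.map_cons, List.sum_cons]
          have : nb graph ^ (reachN graph v).length = (nb graph - 2) * x + 2 * x := by
            have h4 : (reachN graph v).length = ((reachN graph v).length - 1) + 1 := by omega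
            have h5 : nb graph - 2 + 2 = nb graph := Nat.sub_add_cancel hnb
            rw [h4, pow_succ, hxdef]
            calc nb graph ^ ((reachN graph v).length - 1) * nb graph
                = nb graph ^ ((reachN graph v).length - 1) * (nb graph - 2 + 2) := by rw [h5]
              _ = (nb graph - 2) * nb graph ^ ((reachN graph v).length - 1) +
                  2 * nb graph ^ ((reachN graph v).length - 1) := by ring
          rw [this]
          omega
        rw [e3] at hpot
        rw [e1]
        omega

-- ---- parent-dict lemmas ----
def pairIn (P : PySem.Dict Int (List Int)) (s v : Int) : Prop :=
  ∃ ps, PySem.Dict.get? P s = some ps ∧ v ∈ ps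

theorem pair_persist (P : PySem.Dict Int (List Int)) (v s a b : Int) (h : pairIn P a b) :
    pairIn (updP P v s) a b := by
  obtain ⟨ps, hps, hb⟩ := h
  unfold updP
  cases h0 : PySem.Dict.get? P s with
  | none =>
    by_cases has : a = s
    · subst has; rw [hps] at h0; exact absurd h0 (by simp)
    · exact ⟨ps, by rw [PySem.Dict.get?_insert_of_ne _ _ has, hps], hb⟩
  | some ps0 =>
    dsimp only
    by_cases hvp : v ∈ ps0
    · rw [if_pos hvp]; exact ⟨ps, hps, hb⟩
    · rw [if_neg hvp]
      by_cases has : a = s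
      · subst has
        rw [hps] at h0
        have he : ps = ps0 := by injection h0
        refine ⟨ps0 ++ [v], PySem.Dict.get?_insert_self _ _ _, ?_⟩
        simp [he ▸ hb]
      · exact ⟨ps, by rw [PySem.Dict.get?_insert_of_ne _ _ has, hps], hb⟩

theorem pair_new (P : PySem.Dict Int (List Int)) (v s : Int) : pairIn (updP P v s) s v := by
  unfold updP
  cases h0 : PySem.Dict.get? P s with
  | none => exact ⟨[v], PySem.Dict.get?_insert_self _ _ _, by simp⟩
  | some ps0 =>
    dsimp only
    by_cases hvp : v ∈ ps0
    · rw [if_pos hvp]; exact ⟨ps0, h0, hvp⟩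
    · rw [if_neg hvp]; exact ⟨ps0 ++ [v], PySem.Dict.get?_insert_self _ _ _, by simp⟩

theorem updP_noop (P : PySem.Dict Int (List Int)) (v s : Int) (h : pairIn P s v) : updP P v s = P := by
  obtain ⟨ps, hps, hv⟩ := h
  simp [updP, hps, hv]

theorem foldP_persist (v a b : Int) : ∀ (adj : List Int) (P : PySem.Dict Int (List Int)), pairIn P a b →
    pairIn (adj.foldl (fun P s => updP P v s) P) a b := by
  intro adj
  induction adj with
  | nil => intro P h; exact h
  | cons c t ih => intro P h; exact ih _ (pair_persist P v c a b h)

theorem foldP_pairs (v : Int) : ∀ (adj : List Int) (P : PySem.Dict Int (List Int)) (s : Int), s ∈ adj →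
    pairIn (adj.foldl (fun P s => updP P v s) P) s v := by
  intro adj
  induction adj with
  | nil => intro P s h; simp at h
  | cons c t ih =>
    intro P s h
    rcases List.mem_cons.mp h with h | h
    · subst h; exact foldP_persist v s v t _ (pair_new P v s)
    · exact ih _ s h

theorem foldP_noop (v : Int) : ∀ (adj : List Int) (P : PySem.Dict Int (List Int)),
    (∀ s ∈ adj, pairIn P s v) → adj.foldl (fun P s => updP P v s) P = P := by
  intro adj
  induction adj with
  | nil => intro P _; rfl
  | cons c t ih =>
    intro P h
    simp only [List.foldl_cons]
    rw [updP_noop P v c (h c (by simp))]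
    exact ih P (fun s hs => h s (by simp [hs]))

-- ---- dedup-filter: the first occurrences of A's queue not yet processed ----
def ddf (acc : List Int) : List Int → List Int
  | [] => []
  | x :: xs => if x ∈ acc then ddf acc xs else x :: ddf (x :: acc) xs

theorem ddf_congr : ∀ (l acc₁ acc₂ : List Int), (∀ x, x ∈ acc₁ ↔ x ∈ acc₂) →
    ddf acc₁ l = ddf acc₂ l := by
  intro l
  induction l with
  | nil => intro _ _ _; rfl
  | cons x t ih =>
    intro acc₁ acc₂ h
    simp only [ddf]
    by_cases hx : x ∈ acc₁
    · rw [if_pos hx, if_pos ((h x).mp hx)]; exact ih _ _ h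
    · rw [if_neg hx, if_neg (fun hc => hx ((h x).mpr hc))]
      congr 1
      exact ih _ _ (by intro y; simp [h y])

theorem ddf_append : ∀ (l₁ l₂ acc : List Int),
    ddf acc (l₁ ++ l₂) = ddf acc l₁ ++ ddf (ddf acc l₁ ++ acc) l₂ := by
  intro l₁
  induction l₁ with
  | nil => intro l₂ acc; simp [ddf]
  | cons x t ih =>
    intro l₂ acc
    simp only [List.cons_append, ddf]
    by_cases hx : x ∈ acc
    · rw [if_pos hx, if_pos hx]; exact ih l₂ acc
    · rw [if_neg hx, if_neg hx]
      rw [ih l₂ (x :: acc)]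
      simp only [List.cons_append]
      congr 2
      apply ddf_congr
      intro y
      simp only [List.mem_append, List.mem_cons]
      tauto

theorem ddf_nil : ∀ (l acc : List Int), (∀ x ∈ l, x ∈ acc) → ddf acc l = [] := by
  intro l
  induction l with
  | nil => intro acc _; rfl
  | cons x t ih =>
    intro acc h
    simp only [ddf, if_pos (h x (by simp))]
    exact ih acc (fun y hy => h y (by simp [hy]))

theorem ddf_sub : ∀ (l acc : List Int) (x : Int), x ∈ ddf acc l → x ∈ l := by
  intro l
  induction l with
  | nil => intro acc x h; simp [ddf] at h
  | cons c t ih =>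
    intro acc x h
    simp only [ddf] at h
    by_cases hc : c ∈ acc
    · rw [if_pos hc] at h; exact List.mem_cons.mpr (Or.inr (ih acc x h))
    · rw [if_neg hc] at h
      rcases List.mem_cons.mp h with h | h
      · simp [h]
      · exact List.mem_cons.mpr (Or.inr (ih _ x h))

theorem mem_ddf_or : ∀ (l acc : List Int) (s : Int), s ∈ l → s ∈ acc ∨ s ∈ ddf acc l := by
  intro l
  induction l with
  | nil => intro acc s h; simp at h
  | cons x t ih =>
    intro acc s h
    simp only [ddf]
    by_cases hx : x ∈ acc
    · rw [if_pos hx]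
      rcases List.mem_cons.mp h with h | h
      · exact Or.inl (h ▸ hx)
      · exact ih acc s h
    · rw [if_neg hx]
      rcases List.mem_cons.mp h with h | h
      · exact Or.inr (by simp [h])
      · rcases ih (x :: acc) s h with h2 | h2
        · rcases List.mem_cons.mp h2 with h3 | h3
          · exact Or.inr (by simp [h3])
          · exact Or.inl h3
        · exact Or.inr (by simp [h2])

-- ---- characterisation of the combined loop's inner fold ----
theorem foldC_char (graph : List (Int × List Int)) (v : Int) :
    ∀ (l acc qb : List Int) (S : PySem.Set Int) (P : PySem.Dict Int (List Int)),
      (∀ x : Int, x ∈ acc ↔ x ∈ S) →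
      ∃ S' : PySem.Set Int,
        l.foldl (fun st s =>
          let parent := updP st.2.2 v s
          if s ∈ st.2.1 then (st.1, st.2.1, parent)
          else (st.1 ++ [s], PySem.Set.add st.2.1 s, parent)) (qb, S, P) =
          (qb ++ ddf acc l, S', l.foldl (fun P s => updP P v s) P) ∧
        (∀ x : Int, x ∈ S' ↔ x ∈ S ∨ x ∈ ddf acc l) := by
  intro l
  induction l with
  | nil => intro acc qb S P _; exact ⟨S, by simp [ddf], by simp [ddf]⟩
  | cons s t ih =>
    intro acc qb S P hacc
    simp only [List.foldl_cons, ddf]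
    by_cases hs : s ∈ S
    · rw [if_pos hs, if_pos ((hacc s).mpr hs)]
      exact ih acc qb S (updP P v s) hacc
    · rw [if_neg hs, if_neg (fun hc => hs ((hacc s).mp hc))]
      obtain ⟨S', heq, hmem⟩ := ih (s :: acc) (qb ++ [s]) (PySem.Set.add S s) (updP P v s)
        (by intro x
            simp only [List.mem_cons, PySem.Set.mem_add, hacc x]
            tauto)
      refine ⟨S', ?_, ?_⟩
      · rw [heq]
        simp [List.append_assoc]
      · intro x
        rw [hmem x]
        simp only [PySem.Set.mem_add, List.mem_cons]
        tauto

-- ---- the simulation: A's duplicate-requeue loop computes what the seen-set loop computes ----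
theorem sim (graph : List (Int × List Int)) :
    ∀ (fa : Nat) (qa qb D : List Int) (S : PySem.Set Int) (P R : PySem.Dict Int (List Int)),
      ddf D qa = qb →
      (∀ x ∈ qa, x ∈ S) →
      (∀ x ∈ D, x ∈ S) →
      (∀ x ∈ D, ∀ s ∈ adjL graph x, s ∈ S ∧ pairIn P s x) →
      (∀ x : Int, x ∈ S → x ∈ D ∨ x ∈ qb) →
      runFlatO graph fa qa P = some R →
      ∀ fb, fa ≤ fb → runC graph fb qb S P = R := by
  intro fa
  induction fa with
  | zero =>
    intro qa qb D S P R h1 h2 h3 h4 h5 hrun fb hfb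
    cases qa with
    | nil =>
      simp only [runFlatO, Option.some.injEq] at hrun
      have hqb : qb = [] := by rw [← h1]; rfl
      subst hqb
      cases fb <;> simp [runC, hrun]
    | cons v t => simp [runFlatO] at hrun
  | succ fa ih =>
    intro qa qb D S P R h1 h2 h3 h4 h5 hrun fb hfb
    cases qa with
    | nil =>
      simp only [runFlatO, Option.some.injEq] at hrun
      have hqb : qb = [] := by rw [← h1]; rfl
      subst hqb
      cases fb <;> simp [runC, hrun]
    | cons v qa' =>
      have hrun' : runFlatO graph fa (qa' ++ adjL graph v)
          ((adjL graph v).foldl (fun P s => updP P v s) P) = some R := hrun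
      by_cases hvD : v ∈ D
      · -- v was already processed: A's step changes nothing but the queue
        have hP : (adjL graph v).foldl (fun P s => updP P v s) P = P :=
          foldP_noop v _ P (fun s hs => (h4 v hvD s hs).2)
        rw [hP] at hrun'
        have h1' : ddf D qa' = qb := by rw [← h1]; simp [ddf, hvD]
        have hnew1 : ddf D (qa' ++ adjL graph v) = qb := by
          rw [ddf_append, h1', ddf_nil]
          · simp
          · intro x hx
            have hxS := (h4 v hvD x hx).1
            rw [List.mem_append]
            rcases h5 x hxS with h | h
            · exact Or.inr h
            · exact Or.inl h
        exact ih (qa' ++ adjL graph v) qb D S P R hnew1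
          (by intro x hx
              rcases List.mem_append.mp hx with h | h
              · exact h2 x (by simp [h])
              · exact (h4 v hvD x h).1)
          h3 h4 h5 hrun' fb (by omega)
      · -- v is fresh: the seen-set loop processes it too
        have h1c : v :: ddf (v :: D) qa' = qb := by rw [← h1]; simp [ddf, hvD]
        obtain ⟨qb', rfl⟩ : ∃ qb', qb = v :: qb' := ⟨ddf (v :: D) qa', h1c.symm⟩
        have hqb' : ddf (v :: D) qa' = qb' := by injection h1c
        obtain ⟨fb', rfl⟩ : ∃ fb', fb = fb' + 1 := ⟨fb - 1, by omega⟩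
        have hacc : ∀ x : Int, x ∈ (qb' ++ (v :: D)) ↔ x ∈ S := by
          intro x
          constructor
          · intro hx
            rcases List.mem_append.mp hx with h | h
            · have hxqa : x ∈ qa' := ddf_sub qa' (v :: D) x (by rw [hqb']; exact h)
              exact h2 x (by simp [hxqa])
            · rcases List.mem_cons.mp h with h | h
              · exact h ▸ h2 v (by simp)
              · exact h3 x h
          · intro hx
            rcases h5 x hx with h | h
            · simp [h]
            · rcases List.mem_cons.mp h with h | h
              · simp [h]
              · simp [h]
        obtain ⟨S', hfold, hS'⟩ := foldC_char graph v (adjL graph v) (qb' ++ (v :: D)) qb' S P hacc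
        have hrb : runC graph (fb' + 1) (v :: qb') S P =
            runC graph fb' (qb' ++ ddf (qb' ++ (v :: D)) (adjL graph v)) S'
              ((adjL graph v).foldl (fun P s => updP P v s) P) := by
          show runC graph fb' (stepC graph v (qb', S, P)).1 (stepC graph v (qb', S, P)).2.1
              (stepC graph v (qb', S, P)).2.2 = _
          unfold stepC
          rw [hfold]
        rw [hrb]
        have hnews_mem : ∀ s ∈ adjL graph v, s ∈ S' := by
          intro c hc
          rcases mem_ddf_or (adjL graph v) (qb' ++ (v :: D)) c hc with h | h
          · exact (hS' c).mpr (Or.inl ((hacc c).mp h))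
          · exact (hS' c).mpr (Or.inr h)
        apply ih (qa' ++ adjL graph v) (qb' ++ ddf (qb' ++ (v :: D)) (adjL graph v)) (v :: D) S' _ R
        · -- I1
          rw [ddf_append, hqb']
        · -- I2
          intro x hx
          rcases List.mem_append.mp hx with h | h
          · exact (hS' x).mpr (Or.inl (h2 x (by simp [h])))
          · exact hnews_mem x h
        · -- I3
          intro x hx
          rcases List.mem_cons.mp hx with h | h
          · exact (hS' x).mpr (Or.inl (h ▸ h2 v (by simp)))
          · exact (hS' x).mpr (Or.inl (h3 x h))
        · -- I4
          intro x hx c hc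
          rcases List.mem_cons.mp hx with h | h
          · subst h
            exact ⟨hnews_mem c hc, foldP_pairs x _ P c hc⟩
          · exact ⟨(hS' c).mpr (Or.inl (h4 x h c hc).1), foldP_persist v c x _ P (h4 x h c hc).2⟩
        · -- I5
          intro x hx
          rcases (hS' x).mp hx with h | h
          · rcases h5 x h with h | h
            · exact Or.inl (by simp [h])
            · rcases List.mem_cons.mp h with h | h
              · exact Or.inl (by simp [h])
              · exact Or.inr (by simp [h])
          · exact Or.inr (by simp [h])
        · exact hrun'
        · omega

-- ===== VERDICT (by name: the statement is the Claim_ definition above) =====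
theorem BFS_parent_spec : Claim_equal_BFS_parent := by
  intro graph start end_ _dom pre
  unfold Spec_BFS_parent BFS_parent BFS_parent_alt
  have hnb : 2 ≤ nb graph := by unfold nb; omega
  have hpot : pot graph [start] ≤ fuelA graph := by
    unfold pot fuelA
    simp only [List.map_cons, List.map_nil, List.sum_cons, List.sum_nil, Nat.add_zero]
    apply Nat.pow_le_pow_right (by omega)
    have := reachLen_le graph start
    unfold nb
    omega
  obtain ⟨R, hR⟩ := runFlatO_term graph start end_ pre (fuelA graph) [start] PySem.Dict.empty
    (by intro v hv; simp at hv; rw [hv]; exact reach_self graph start) hpot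
  have hA := runA_of_runFlatO graph (fuelA graph) [start] PySem.Dict.empty R hR
  simp only [List.map_cons, List.map_nil] at hA
  have hC := sim graph (fuelA graph) [start] [start] [] (PySem.Set.ofList [start])
    PySem.Dict.empty R
    (by simp [ddf])
    (by intro x hx; simp at hx; simp [PySem.Set.mem_ofList, hx])
    (by intro x hx; simp at hx)
    (by intro x hx; simp at hx)
    (by intro x hx
        rw [PySem.Set.mem_ofList] at hx
        exact Or.inr hx)
    hR (fuelA graph) le_rfl
  rw [hA]
  simp only [updB_eq_updP]
  rw [← runC_split, hC]
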